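-- pv_equiv track=rewrite | github.com/xttalx/Autoilty | seo/keyword_research_tool.py | cluster_keywords
-- ===== SOURCE A (Python) =====
-- from collections import defaultdict
--
-- def cluster_keywords(keywords):
--     """Cluster keywords by semantic similarity"""
--     clusters = defaultdict(list)
--
--     for kw_obj in keywords:
--         kw = kw_obj["keyword"].lower()
--
--         # Simple clustering by key terms
--         if "winter" in kw or "snow" in kw:
--             clusters["winter"].append(kw_obj)
--         elif "electric" in kw or "ev" in kw or "hybrid" in kw:
--             clusters["electric"].append(kw_obj)
--         elif "buy" in kw or "purchase" in kw or "shopping" in kw: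
--             clusters["buying"].append(kw_obj)
--         elif "repair" in kw or "fix" in kw or "maintenance" in kw:
--             clusters["maintenance"].append(kw_obj)
--         elif "mod" in kw or "custom" in kw or "tuning" in kw:
--             clusters["modification"].append(kw_obj)
--         else:
--             clusters["general"].append(kw_obj)
--
--     return clusters
-- ===== SOURCE B (Python) =====
-- from collections import defaultdict
--
-- _RULES = (
--     ("winter", ("winter", "snow")),
--     ("electric", ("electric", "ev", "hybrid")),
--     ("buying", ("buy", "purchase", "shopping")),
--     ("maintenance", ("repair", "fix", "maintenance")),
--     ("modification", ("mod", "custom", "tuning")),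
-- )
--
-- def _category(kw):
--     return next((cat for cat, terms in _RULES if any(t in kw for t in terms)), "general")
--
-- def cluster_keywords(keywords):
--     # staged group-by: tag every item with its category, then emit one
--     # fully-built bucket per category in first-occurrence order
--     tagged = [(_category(o["keyword"].lower()), o) for o in keywords]
--     clusters = defaultdict(list)
--     for cat in dict.fromkeys(c for c, _ in tagged):
--         clusters[cat] = [o for c, o in tagged if c == cat]
--     return clusters
-- ===== Notes on version B (the rewrite author's own statement) =====
-- stated objective: alternative
-- what changed: Replaces A's single-pass per-item dispatch (if/elif chain appending each item to its bucket as it goes) with a staged group-by: one pass tags every item with its category, the category order is then deduplicated, and each bucket is emitted whole by a per-category filter over the tagged list.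
import Mathlib
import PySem

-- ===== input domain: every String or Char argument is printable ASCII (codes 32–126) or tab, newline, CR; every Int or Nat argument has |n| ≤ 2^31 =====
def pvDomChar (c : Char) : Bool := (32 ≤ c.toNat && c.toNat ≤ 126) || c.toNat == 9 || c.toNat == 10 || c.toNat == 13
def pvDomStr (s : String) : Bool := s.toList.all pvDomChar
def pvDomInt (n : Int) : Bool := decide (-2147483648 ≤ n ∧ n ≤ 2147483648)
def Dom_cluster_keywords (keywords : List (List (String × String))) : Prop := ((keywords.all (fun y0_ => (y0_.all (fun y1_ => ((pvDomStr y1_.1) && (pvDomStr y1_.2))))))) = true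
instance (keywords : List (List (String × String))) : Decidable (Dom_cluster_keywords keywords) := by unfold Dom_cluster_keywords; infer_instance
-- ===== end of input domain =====

-- B replaces A's single-pass per-item dispatch with a staged group-by (tag each item with
-- its category, dedup the category order, emit each bucket by a per-category filter);
-- alternative decomposition, same O(n) cost.


-- ===== PORT A =====
-- A's loop body: look up "keyword", lowercase, then the if/elif chain, each branch appending
-- kw_obj to its cluster (defaultdict(list) → Dict.modify with default []).
def pvStepA (d : PySem.Dict String (List (List (String × String))))
    (kw_obj : List (String × String)) : PySem.Dict String (List (List (String × String))) :=
  match (PySem.Dict.mk kw_obj).get? "keyword" with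
  | none => d  -- Python raises KeyError here; excluded by Pre_
  | some v =>
    let kw := PySem.Str.lower v
    if PySem.Str.isIn "winter" kw || PySem.Str.isIn "snow" kw then
      d.modify "winter" [] (· ++ [kw_obj])
    else if PySem.Str.isIn "electric" kw || PySem.Str.isIn "ev" kw || PySem.Str.isIn "hybrid" kw then
      d.modify "electric" [] (· ++ [kw_obj])
    else if PySem.Str.isIn "buy" kw || PySem.Str.isIn "purchase" kw || PySem.Str.isIn "shopping" kw then
      d.modify "buying" [] (· ++ [kw_obj])
    else if PySem.Str.isIn "repair" kw || PySem.Str.isIn "fix" kw || PySem.Str.isIn "maintenance" kw then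
      d.modify "maintenance" [] (· ++ [kw_obj])
    else if PySem.Str.isIn "mod" kw || PySem.Str.isIn "custom" kw || PySem.Str.isIn "tuning" kw then
      d.modify "modification" [] (· ++ [kw_obj])
    else
      d.modify "general" [] (· ++ [kw_obj])

def cluster_keywords (keywords : List (List (String × String))) : List (String × List (List (String × String))) :=
  (keywords.foldl pvStepA PySem.Dict.empty).items

-- ===== PORT B =====
def pvRules : List (String × List String) :=
  [("winter", ["winter", "snow"]),
   ("electric", ["electric", "ev", "hybrid"]),
   ("buying", ["buy", "purchase", "shopping"]),
   ("maintenance", ["repair", "fix", "maintenance"]),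
   ("modification", ["mod", "custom", "tuning"])]

-- B's _category: next((cat for cat, terms in _RULES if any(...)), "general") → find? + default.
def pvCategory (kw : String) : String :=
  ((pvRules.find? (fun r => r.2.any (fun t => PySem.Str.isIn t kw))).map (·.1)).getD "general"

-- category of one kw_obj ("keyword" lookup then lowercase); Python raises KeyError on a
-- missing key (excluded by Pre_), the placeholder "" is never reached under Pre_.
def pvCatOf (o : List (String × String)) : String :=
  match (PySem.Dict.mk o).get? "keyword" with
  | none => ""
  | some v => pvCategory (PySem.Str.lower v)

def cluster_keywords_alt (keywords : List (List (String × String))) : List (String × List (List (String × String))) :=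
  let tagged := keywords.map (fun o => (pvCatOf o, o))
  let cats := PySem.List.dedup (tagged.map (·.1))
  (cats.foldl (fun d c => d.insert c ((tagged.filter (fun p => p.1 == c)).map (·.2))) PySem.Dict.empty).items

-- ===== PRECONDITION & SPEC =====
-- Pre_: every kw_obj has a "keyword" entry; otherwise Python A raises KeyError.
def Pre_cluster_keywords (keywords : List (List (String × String))) : Prop :=
  ∀ o ∈ keywords, ((PySem.Dict.mk o).get? "keyword").isSome = true
instance (keywords : List (List (String × String))) : Decidable (Pre_cluster_keywords keywords) := by unfold Pre_cluster_keywords; infer_instance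
def pvWitness_cluster_keywords : (List (List (String × String))) :=
  [[("keyword", "Buy Snow Tires")], [("keyword", "engine repair"), ("volume", "10")]]

def Spec_cluster_keywords (keywords : List (List (String × String))) (out : List (String × List (List (String × String)))) : Prop := out = cluster_keywords_alt keywords
instance (keywords : List (List (String × String))) (out : List (String × List (List (String × String)))) : Decidable (Spec_cluster_keywords keywords out) := by unfold Spec_cluster_keywords; infer_instance

-- ===== CLAIM (what is proved, stated in full; the proofs are below) =====
def Claim_equal_cluster_keywords : Prop := ∀ (keywords : List (List (String × String))), Dom_cluster_keywords keywords → Pre_cluster_keywords keywords → Spec_cluster_keywords keywords (cluster_keywords keywords)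

-- ===== LEMMAS AND PROOFS =====

-- A's step IS "append kw_obj under its category" whenever the "keyword" lookup succeeds.
lemma pvStepA_eq_modify (d : PySem.Dict String (List (List (String × String))))
    (o : List (String × String)) (h : ((PySem.Dict.mk o).get? "keyword").isSome = true) :
    pvStepA d o = d.modify (pvCatOf o) [] (· ++ [o]) := by
  unfold pvStepA pvCatOf
  cases hk : (PySem.Dict.mk o).get? "keyword" with
  | none => simp [hk] at h
  | some v =>
    simp only [pvCategory, pvRules, List.find?, List.any_cons, List.any_nil,
      Bool.or_false, Bool.or_assoc]
    split_ifs with h1 h2 h3 h4 h5 <;>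
      simp only [Bool.not_eq_true] at * <;> simp only [*] <;> rfl

lemma pvFoldA_eq (keywords : List (List (String × String)))
    (h : ∀ o ∈ keywords, ((PySem.Dict.mk o).get? "keyword").isSome = true)
    (d : PySem.Dict String (List (List (String × String)))) :
    keywords.foldl pvStepA d
      = keywords.foldl (fun d o => d.modify (pvCatOf o) [] (· ++ [o])) d := by
  induction keywords generalizing d with
  | nil => rfl
  | cons o rest ih =>
    simp only [List.foldl_cons]
    rw [pvStepA_eq_modify d o (h o (by simp))]
    exact ih (fun x hx => h x (by simp [hx])) _

-- the heart of the equivalence: appending each tagged item under its tag as you go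
-- produces the same items list as inserting, per deduplicated tag, the whole filtered bucket.
lemma pvGrouping (tagged : List (String × List (String × String))) :
    (tagged.foldl (fun (d : PySem.Dict String (List (List (String × String)))) p =>
        d.modify p.1 [] (· ++ [p.2])) PySem.Dict.empty).items
      = ((PySem.List.dedup (tagged.map (·.1))).foldl
          (fun d c => d.insert c ((tagged.filter (fun p => p.1 == c)).map (·.2)))
          PySem.Dict.empty).items := by
  have hnd : (tagged.foldl (fun (d : PySem.Dict String (List (List (String × String)))) p =>
      d.modify p.1 [] (· ++ [p.2])) PySem.Dict.empty).keys.Nodup :=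
    PySem.Dict.nodup_keys_foldl_modify_key _ _ _ _ _ PySem.Dict.nodup_keys_empty
  have hins : ((PySem.List.dedup (tagged.map (·.1))).foldl
      (fun d c => d.insert c ((tagged.filter (fun p => p.1 == c)).map (·.2)))
      PySem.Dict.empty).items
      = (PySem.List.dedup (tagged.map (·.1))).map
          (fun c => (c, (tagged.filter (fun p => p.1 == c)).map (·.2))) := by
    simpa using PySem.Dict.items_foldl_insert_fresh (PySem.List.dedup (tagged.map (·.1)))
      (fun c => c) (fun c => (tagged.filter (fun p => p.1 == c)).map (·.2)) PySem.Dict.empty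
      (fun a _ => PySem.Dict.contains_empty _)
      (by simp)
  rw [PySem.Dict.items_eq_map_keys _ hnd [], PySem.Dict.keys_foldl_modify_key, hins]
  simp only [PySem.Dict.getD_foldl_modify_append, PySem.Dict.getD_empty, List.nil_append,
    PySem.List.dedup_eq_ofList, PySem.Set.update_nil_left, PySem.Dict.keys_empty]

-- ===== VERDICT (by name: the statement is the Claim_ definition above) =====
theorem cluster_keywords_spec : Claim_equal_cluster_keywords := by
  intro keywords _ hpre
  unfold Spec_cluster_keywords cluster_keywords cluster_keywords_alt
  rw [pvFoldA_eq keywords hpre,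
    ← List.foldl_map (f := fun o => (pvCatOf o, o))
      (g := fun (d : PySem.Dict String (List (List (String × String)))) p =>
        d.modify p.1 [] (· ++ [p.2]))]
  exact pvGrouping _
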